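-- pv_equiv track=rewrite | github.com/nguyenqdat2001/ALPR_FaceRecog | cropnumber.py | sort_contours_y
-- ===== SOURCE A (Python) =====
-- def sort_contours_y(list_cnts):
--     list_tren = []
--     list_duoi = []
--     lenth = len(list_cnts)
--     for i in range(0, lenth):
--         if  list_cnts[i][1] < 180:
--             list_tren.append(list_cnts[i])
--         else:
--             list_duoi.append(list_cnts[i])
--     return list_tren + list_duoi
-- ===== SOURCE B (Python) =====
-- def sort_contours_y(list_cnts):
--     return sorted(list_cnts, key=lambda c: c[1] >= 180)
-- ===== Notes on version B (the rewrite author's own statement) =====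
-- stated objective: idiomatic
-- what changed: Replaces the explicit two-bucket accumulation loop with a single stable sort on the boolean key c[1] >= 180, whose stability reproduces list_tren + list_duoi exactly.
import Mathlib
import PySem

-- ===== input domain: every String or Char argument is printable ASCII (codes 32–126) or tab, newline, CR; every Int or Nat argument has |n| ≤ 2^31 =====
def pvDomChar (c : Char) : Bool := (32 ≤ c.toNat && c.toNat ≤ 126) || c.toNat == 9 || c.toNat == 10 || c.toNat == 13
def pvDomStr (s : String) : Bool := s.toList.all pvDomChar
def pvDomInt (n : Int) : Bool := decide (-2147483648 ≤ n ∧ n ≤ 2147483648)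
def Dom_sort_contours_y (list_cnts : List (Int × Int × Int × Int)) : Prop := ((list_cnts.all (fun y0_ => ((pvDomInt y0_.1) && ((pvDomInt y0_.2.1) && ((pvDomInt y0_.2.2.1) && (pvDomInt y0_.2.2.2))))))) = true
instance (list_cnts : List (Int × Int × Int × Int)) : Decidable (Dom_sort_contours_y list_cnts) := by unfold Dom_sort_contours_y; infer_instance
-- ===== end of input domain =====

-- B replaces A's two-bucket accumulation loop by one stable sort on the boolean key c[1] >= 180 (idiomatic; same return value).

-- ===== PORT A =====
-- A: two accumulator lists, indexed loop over range(0, len(list_cnts)), then concatenation.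
def sort_contours_y (list_cnts : List (Int × Int × Int × Int)) : List (Int × Int × Int × Int) :=
  let lenth := PySem.List.len list_cnts
  let st := (PySem.List.pyRange 0 lenth 1).foldl
    (fun (st : List (Int × Int × Int × Int) × List (Int × Int × Int × Int)) i =>
      -- list_cnts[i]: always in range here, so pyGetD is exact
      let c := PySem.List.pyGetD list_cnts i (0, 0, 0, 0)
      if c.2.1 < 180 then (st.1 ++ [c], st.2) else (st.1, st.2 ++ [c]))
    ([], [])
  st.1 ++ st.2

-- ===== PORT B =====
-- B: sorted(list_cnts, key=lambda c: c[1] >= 180); Python's False < True is Lean's Bool order.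
def sort_contours_y_alt (list_cnts : List (Int × Int × Int × Int)) : List (Int × Int × Int × Int) :=
  PySem.List.sorted list_cnts (fun c => decide (180 ≤ c.2.1)) false

-- ===== PRECONDITION & SPEC =====
def Spec_sort_contours_y (list_cnts : List (Int × Int × Int × Int)) (out : List (Int × Int × Int × Int)) : Prop := out = sort_contours_y_alt list_cnts
instance (list_cnts : List (Int × Int × Int × Int)) (out : List (Int × Int × Int × Int)) : Decidable (Spec_sort_contours_y list_cnts out) := by unfold Spec_sort_contours_y; infer_instance

-- ===== CLAIM (what is proved, stated in full; the proofs are below) =====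
def Claim_equal_sort_contours_y : Prop := ∀ (list_cnts : List (Int × Int × Int × Int)), Dom_sort_contours_y list_cnts → Spec_sort_contours_y list_cnts (sort_contours_y list_cnts)

-- ===== LEMMAS AND PROOFS =====

-- the key B sorts by
def pvKey (c : Int × Int × Int × Int) : Bool := decide (180 ≤ c.2.1)

-- A's loop, over the list itself, is the two filters appended
theorem pvA_foldl (xs : List (Int × Int × Int × Int))
    (t d : List (Int × Int × Int × Int)) :
    xs.foldl (fun (st : List (Int × Int × Int × Int) × List (Int × Int × Int × Int)) c =>
        if c.2.1 < 180 then (st.1 ++ [c], st.2) else (st.1, st.2 ++ [c])) (t, d)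
      = (t ++ xs.filter (fun c => !pvKey c), d ++ xs.filter (fun c => pvKey c)) := by
  induction xs generalizing t d with
  | nil => simp
  | cons x xs ih =>
    by_cases h : x.2.1 < 180
    · simp [List.foldl_cons, h, ih, pvKey, not_le.mpr h]
    · simp [List.foldl_cons, h, ih, pvKey, not_lt.mp h]

-- inserting a key-false element into (all-false F) ++ (all-true G) lands between them
theorem pvInsert_false (x : Int × Int × Int × Int) (F G : List (Int × Int × Int × Int))
    (hF : ∀ y ∈ F, pvKey y = false) (hG : ∀ y ∈ G, pvKey y = true) (hx : pvKey x = false) :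
    PySem.List.insertBy (fun a b => decide (pvKey a < pvKey b)) x (F ++ G)
      = (F ++ [x]) ++ G := by
  induction F with
  | nil =>
    cases G with
    | nil => simp [PySem.List.insertBy]
    | cons g gs =>
      have : pvKey g = true := hG g (by simp)
      simp [PySem.List.insertBy, hx, this]
  | cons f fs ih =>
    have hf : pvKey f = false := hF f (by simp)
    simp [PySem.List.insertBy, hx, hf, ih (fun y hy => hF y (by simp [hy]))]

-- inserting a key-true element appends at the end
theorem pvInsert_true (x : Int × Int × Int × Int) (L : List (Int × Int × Int × Int))
    (hx : pvKey x = true) :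
    PySem.List.insertBy (fun a b => decide (pvKey a < pvKey b)) x L = L ++ [x] := by
  apply PySem.List.insertBy_of_forall_not_before
  intro y _
  simp [hx]

-- B's insertion sort keeps the buckets: invariant of the foldl
theorem pvB_foldl (xs F G : List (Int × Int × Int × Int))
    (hF : ∀ y ∈ F, pvKey y = false) (hG : ∀ y ∈ G, pvKey y = true) :
    xs.foldl (fun acc x => PySem.List.insertBy (fun a b => decide (pvKey a < pvKey b)) x acc) (F ++ G)
      = (F ++ xs.filter (fun c => !pvKey c)) ++ (G ++ xs.filter (fun c => pvKey c)) := by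
  induction xs generalizing F G with
  | nil => simp
  | cons x xs ih =>
    by_cases hx : pvKey x = true
    · rw [List.foldl_cons, pvInsert_true x (F ++ G) hx, List.append_assoc F G [x],
        ih F (G ++ [x]) hF (by intro y hy; rcases List.mem_append.mp hy with h | h
                               · exact hG y h
                               · simp at h; simpa [h])]
      simp [hx]
    · have hx' : pvKey x = false := by simpa using hx
      rw [List.foldl_cons, pvInsert_false x F G hF hG hx',
        ih (F ++ [x]) G (by intro y hy; rcases List.mem_append.mp hy with h | h
                            · exact hF y h
                            · simp at h; simpa [h]) hG]
      simp [hx']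

theorem pvA_eq (xs : List (Int × Int × Int × Int)) :
    sort_contours_y xs = xs.filter (fun c => !pvKey c) ++ xs.filter (fun c => pvKey c) := by
  show (List.foldl
      (fun (st : List (Int × Int × Int × Int) × List (Int × Int × Int × Int)) i =>
        let c := PySem.List.pyGetD xs i (0, 0, 0, 0)
        if c.2.1 < 180 then (st.1 ++ [c], st.2) else (st.1, st.2 ++ [c]))
      ([], []) (PySem.List.pyRange 0 (PySem.List.len xs))).1 ++ _ = _
  rw [PySem.List.foldl_pyRange_pyGetD xs (0,0,0,0)
      (fun st c => if c.2.1 < 180 then (st.1 ++ [c], st.2) else (st.1, st.2 ++ [c]))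
      ([], []) le_rfl]
  simp [pvA_foldl]

theorem pvB_eq (xs : List (Int × Int × Int × Int)) :
    sort_contours_y_alt xs = xs.filter (fun c => !pvKey c) ++ xs.filter (fun c => pvKey c) := by
  unfold sort_contours_y_alt
  rw [PySem.List.sorted_eq_foldl_insertBy]
  have := pvB_foldl xs [] [] (by simp) (by simp)
  simpa [pvKey] using this

-- ===== VERDICT (by name: the statement is the Claim_ definition above) =====
theorem sort_contours_y_spec : Claim_equal_sort_contours_y := by
  intro xs _
  unfold Spec_sort_contours_y
  rw [pvA_eq, pvB_eq]
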